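-- pv_equiv track=rewrite | github.com/Usherwood/usherwood_ds | main/nlp/taxonomy/create_macro_tags.py | split_tags_to_levels
-- ===== SOURCE A (Python) =====
-- def split_tags_to_levels(attribute_cols, max_depth):
--     """
--     Split the list of tags in attribute cols into sub lists grouped by level
--
--     :param attribute_cols: List[str], complete list of categories
--     :param max_depth:  Int, Max depth of categories
--
--     :return: list of lists where each sub list are the tags of that level, starting with the lowest
--     """
--
--     level_tags = []
--     for i in range(0, max_depth):
--         level = max_depth - i
--         current_level_tags = []
--         for att in attribute_cols:
--             att_level = len(att.split('.')) - 1
--             if att_level == level: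
--                 current_level_tags += [att]
--
--         level_tags.append(current_level_tags)
--
--     return level_tags
-- ===== SOURCE B (Python) =====
-- def split_tags_to_levels(attribute_cols, max_depth):
--     # Single pass: bucket attributes by their level, then emit buckets from
--     # max_depth down to 1.
--     buckets = {}
--     for att in attribute_cols:
--         lvl = len(att.split('.')) - 1
--         buckets[lvl] = buckets.get(lvl, []) + [att]
--     return [buckets.get(max_depth - i, []) for i in range(max_depth)]
-- ===== Notes on version B (the rewrite author's own statement) =====
-- stated objective: faster
-- what changed: Replaces the max_depth nested rescans of attribute_cols with one bucketing pass over the list into a level-keyed dict, then emits the buckets from max_depth down to 1.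
import Mathlib
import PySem

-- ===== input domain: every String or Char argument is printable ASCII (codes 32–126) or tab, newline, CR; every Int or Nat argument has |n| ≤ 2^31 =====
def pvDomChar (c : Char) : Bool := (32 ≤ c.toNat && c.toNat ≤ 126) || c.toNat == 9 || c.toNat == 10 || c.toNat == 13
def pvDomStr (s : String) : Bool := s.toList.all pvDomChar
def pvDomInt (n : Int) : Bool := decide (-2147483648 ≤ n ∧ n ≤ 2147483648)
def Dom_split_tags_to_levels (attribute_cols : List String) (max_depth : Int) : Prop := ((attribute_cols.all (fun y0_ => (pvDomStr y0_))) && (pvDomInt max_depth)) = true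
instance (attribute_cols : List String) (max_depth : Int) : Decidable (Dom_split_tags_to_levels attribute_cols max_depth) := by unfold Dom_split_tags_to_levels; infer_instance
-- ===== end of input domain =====

-- B replaces A's per-level rescans of the whole list by one bucketing pass into a
-- level-keyed dict (objective: faster).

-- ===== PORT A =====
def split_tags_to_levels (attribute_cols : List String) (max_depth : Int) : List (List String) :=
  (PySem.List.pyRange 0 max_depth 1).foldl
    (fun level_tags i =>
      let level := max_depth - i
      let current_level_tags := attribute_cols.foldl
        (fun cur att =>
          let att_level := ((PySem.Chars.splitOn att.toList ['.']).length : Int) - 1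
          if att_level = level then cur ++ [att] else cur) []
      level_tags ++ [current_level_tags]) []

-- ===== PORT B =====
def split_tags_to_levels_alt (attribute_cols : List String) (max_depth : Int) : List (List String) :=
  let buckets := attribute_cols.foldl
    (fun d att =>
      let lvl := ((PySem.Chars.splitOn att.toList ['.']).length : Int) - 1
      d.modify lvl [] (· ++ [att])) PySem.Dict.empty
  (PySem.List.pyRange 0 max_depth 1).map (fun i => buckets.getD (max_depth - i) [])

-- ===== PRECONDITION & SPEC =====
def Spec_split_tags_to_levels (attribute_cols : List String) (max_depth : Int) (out : List (List String)) : Prop := out = split_tags_to_levels_alt attribute_cols max_depth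
instance (attribute_cols : List String) (max_depth : Int) (out : List (List String)) : Decidable (Spec_split_tags_to_levels attribute_cols max_depth out) := by unfold Spec_split_tags_to_levels; infer_instance

-- ===== CLAIM (what is proved, stated in full; the proofs are below) =====
def Claim_equal_split_tags_to_levels : Prop := ∀ (attribute_cols : List String) (max_depth : Int), Dom_split_tags_to_levels attribute_cols max_depth → Spec_split_tags_to_levels attribute_cols max_depth (split_tags_to_levels attribute_cols max_depth)

-- ===== LEMMAS AND PROOFS =====

-- B's bucket at key k holds exactly the attributes whose level is k, in order.
theorem pv_bucket_getD (attribute_cols : List String) (k : Int) :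
    (attribute_cols.foldl
      (fun d att =>
        let lvl := ((PySem.Chars.splitOn att.toList ['.']).length : Int) - 1
        d.modify lvl [] (· ++ [att])) PySem.Dict.empty).getD k []
    = attribute_cols.filter (fun att => ((PySem.Chars.splitOn att.toList ['.']).length : Int) - 1 == k) := by
  have h := PySem.Dict.getD_foldl_modify_append
    (l := attribute_cols.map (fun att => (((PySem.Chars.splitOn att.toList ['.']).length : Int) - 1, att)))
    (d := PySem.Dict.empty) (c := k)
  simp only [List.foldl_map] at h
  simp only [h, PySem.Dict.getD_empty, List.nil_append, List.filter_map, List.map_map]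
  simp [Function.comp_def]

-- ===== VERDICT (by name: the statement is the Claim_ definition above) =====
theorem split_tags_to_levels_spec : Claim_equal_split_tags_to_levels := by
  intro attribute_cols max_depth _
  unfold Spec_split_tags_to_levels split_tags_to_levels split_tags_to_levels_alt
  simp only [List.nil_append, PySem.List.foldl_append_singleton_eq_map, pv_bucket_getD]
  refine List.map_congr_left fun i _ => ?_
  have h := PySem.List.foldl_append_if
    (fun att => ((PySem.Chars.splitOn att.toList ['.']).length : Int) - 1 == max_depth - i)
    id attribute_cols []
  simpa using h
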